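-- pv_equiv track=rewrite | github.com/abcyclonz/E.L.A.R.A | agents/elara/learning_agent/state_classifier.py | _trailing_noncalm_streak
-- ===== SOURCE A (Python) =====
-- from typing import List, Optional, Tuple
--
-- def _trailing_noncalm_streak(window: List[str]) -> int:
--     streak = 0
--     for entry in reversed(window):
--         if entry != "calm":
--             streak += 1
--         else:
--             break
--     return streak
-- ===== SOURCE B (Python) =====
-- from typing import List, Optional, Tuple
--
-- def _trailing_noncalm_streak(window: List[str]) -> int:
--     # Forward scan: remember the position of the LAST "calm"; the trailing
--     # non-calm streak is everything after it.
--     last_calm = -1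
--     for i, entry in enumerate(window):
--         if entry == "calm":
--             last_calm = i
--     return len(window) - 1 - last_calm
-- ===== Notes on version B (the rewrite author's own statement) =====
-- stated objective: alternative
-- what changed: Replaced the backward break-driven counting loop by a forward enumerate scan that records the index of the last 'calm' and derives the streak arithmetically as len(window)-1-last_calm.
import Mathlib
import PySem

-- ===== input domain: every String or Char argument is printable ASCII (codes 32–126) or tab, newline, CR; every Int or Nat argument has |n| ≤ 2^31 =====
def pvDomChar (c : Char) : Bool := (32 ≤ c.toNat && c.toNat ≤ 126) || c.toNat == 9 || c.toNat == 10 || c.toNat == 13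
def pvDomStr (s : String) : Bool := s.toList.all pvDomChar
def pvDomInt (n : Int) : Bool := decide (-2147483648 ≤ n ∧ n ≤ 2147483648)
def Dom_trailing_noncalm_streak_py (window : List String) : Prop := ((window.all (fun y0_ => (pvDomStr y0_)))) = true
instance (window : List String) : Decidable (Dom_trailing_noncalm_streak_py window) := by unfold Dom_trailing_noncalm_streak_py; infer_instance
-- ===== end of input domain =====

-- B replaces A's backward break-driven counter by a forward enumerate scan tracking the last "calm" index; same return value, different decomposition.

-- ===== PORT A =====
-- A's loop: walk reversed(window), add 1 per non-"calm" entry, break at the first "calm".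
def pvLoopA : List String → Int → Int
  | [], streak => streak
  | e :: rest, streak => if e ≠ "calm" then pvLoopA rest (streak + 1) else streak

def trailing_noncalm_streak_py (window : List String) : Int :=
  pvLoopA window.reverse 0

-- ===== PORT B =====
-- B's loop: 'for i, entry in enumerate(window): if entry == "calm": last_calm = i'
def pvLastCalm : List (Int × String) → Int → Int
  | [], last => last
  | (i, e) :: rest, last => pvLastCalm rest (if e = "calm" then i else last)

def trailing_noncalm_streak_py_alt (window : List String) : Int :=
  (window.length : Int) - 1 - pvLastCalm (PySem.List.enumerate window) (-1)

-- ===== PRECONDITION & SPEC =====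
def Spec_trailing_noncalm_streak_py (window : List String) (out : Int) : Prop := out = trailing_noncalm_streak_py_alt window
instance (window : List String) (out : Int) : Decidable (Spec_trailing_noncalm_streak_py window out) := by unfold Spec_trailing_noncalm_streak_py; infer_instance

-- ===== CLAIM (what is proved, stated in full; the proofs are below) =====
def Claim_equal_trailing_noncalm_streak_py : Prop := ∀ (window : List String), Dom_trailing_noncalm_streak_py window → Spec_trailing_noncalm_streak_py window (trailing_noncalm_streak_py window)

-- ===== LEMMAS AND PROOFS =====

-- A's loop equals "index of first 'calm' in the processed list, or its length".
lemma pvLoopA_char (l : List String) (s : Int) :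
    pvLoopA l s = s + (match PySem.List.index? l "calm" with
      | some k => (k : Int) | none => (l.length : Int)) := by
  induction l generalizing s with
  | nil => simp [pvLoopA, PySem.List.index?]
  | cons e rest ih =>
    by_cases he : e = "calm"
    · subst he
      rw [PySem.List.index?_cons_self]
      simp [pvLoopA]
    · rw [PySem.List.index?_cons_of_ne rest he]
      simp only [pvLoopA, if_pos (by exact he)]
      rw [ih]
      cases h : PySem.List.index? rest "calm" <;> simp <;> ring

lemma pvLastCalm_append (xs ys : List (Int × String)) (init : Int) :
    pvLastCalm (xs ++ ys) init = pvLastCalm ys (pvLastCalm xs init) := by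
  induction xs generalizing init with
  | nil => simp [pvLastCalm]
  | cons p rest ih => cases p; simp [pvLastCalm, ih]

-- B's loop equals "position of the last 'calm'", expressed via first 'calm' of the reverse.
lemma pvLastCalm_char (l : List String) (s init : Int) :
    pvLastCalm (PySem.List.enumerate l s) init =
      (match PySem.List.index? l.reverse "calm" with
        | some k => s + ((l.length : Int) - 1 - (k : Int))
        | none => init) := by
  induction l using List.reverseRecOn generalizing init with
  | nil => simp [PySem.List.enumerate, pvLastCalm, PySem.List.index?]
  | append_singleton l a ih =>
    rw [PySem.List.enumerate_append]
    rw [pvLastCalm_append]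
    simp only [PySem.List.enumerate_cons, PySem.List.enumerate_nil, pvLastCalm,
      List.reverse_append, List.reverse_cons, List.reverse_nil, List.nil_append,
      List.cons_append, List.length_append, List.length_cons, List.length_nil]
    by_cases ha : a = "calm"
    · subst ha
      rw [PySem.List.index?_cons_self]
      simp
    · rw [PySem.List.index?_cons_of_ne _ ha]
      rw [ih]
      cases h : PySem.List.index? l.reverse "calm" <;> simp [ha] <;> omega

-- ===== VERDICT (by name: the statement is the Claim_ definition above) =====
theorem trailing_noncalm_streak_py_spec : Claim_equal_trailing_noncalm_streak_py := by
  intro window _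
  show trailing_noncalm_streak_py window = trailing_noncalm_streak_py_alt window
  simp only [trailing_noncalm_streak_py, trailing_noncalm_streak_py_alt, pvLoopA_char,
    pvLastCalm_char, zero_add]
  cases PySem.List.index? window.reverse "calm" <;> simp
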